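-- pv_equiv track=rewrite | github.com/Phylanthropist/datascience-init | venv/Datascience.py | ll_prime
-- ===== SOURCE A (Python) =====
-- def mersenne_number(p):
--     """(2^P - 1) IS A MERSENNE NUMBER, WHERE 'p', IS AN EXPONENT"""
--     val_to_raise_exponent = 2
--     mer_num = ((val_to_raise_exponent ** p) - 1)
--     return mer_num
--
-- def is_prime(number):
--     """THIS FUNCTION CHECKS THE PRIME NUMBERS AND SORT THEM OUT"""
--     if number == 1:
--         return False
--     for factor in range(2, number):
--         if (number % factor) == 0:
--             if (number / factor) > 1.0:
--                 return False
--     return number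
--
-- def get_primes(n_start, n_end):
--     """THIS FUNCTION SHOULD TAKE THE OUTPUT OF is_prime AND MAKE OUT A LIST"""
--     holder = []  # An empty to hold the values
--     for number in range(n_start, n_end):
--         if is_prime(number):
--             holder.append(number)
--     return holder
--
-- def lucas_lehmer(p):
--     count = 3
--     initial = 4
--     final2 = [initial]
--     while count <= p:
--         final = (initial ** 2 - 2) % mersenne_number(p)
--         final2.append(final)
--         initial = final
--         count += 1
--     return final2
--
-- def ll_prime(p):
--     get_prime_holder = get_primes(3, p)
--     lucas_lehmer_holder = []
--     v = []
--     # This get_prime will return for me a list of prime numbers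
--     for val in get_prime_holder:
--         lucas_lehmer_holder.append(lucas_lehmer(val))
--     for val_x in lucas_lehmer_holder:
--         i = lucas_lehmer_holder.index(val_x)
--         # These i holds the index position for the list(val_x) inside the list(lucas_lehmer_holder)
--         if val_x[-1] == 0:
--             v += [(get_prime_holder[i], 1)]
--         elif val_x[-1] != 0:
--
--             v += [(get_prime_holder[i], 0)]
--     return v
-- ===== SOURCE B (Python) =====
-- def ll_prime(p):
--     # Sieve of Eratosthenes over [2, p) instead of per-number trial division,
--     # then a single pass computing only the running Lucas-Lehmer residue.
--     comp = set()
--     primes = []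
--     for i in range(2, p):
--         if i not in comp:
--             if i >= 3:
--                 primes.append(i)
--             comp.update(range(i * i, p, i))
--     out = []
--     for q in primes:
--         m = 2 ** q - 1
--         s = 4
--         for _ in range(q - 2):
--             s = (s * s - 2) % m
--         out.append((q, 1 if s == 0 else 0))
--     return out
-- ===== Notes on version B (the rewrite author's own statement) =====
-- stated objective: alternative
-- what changed: B generates the primes below p with a Sieve of Eratosthenes (a set of composites built by marking multiples of each unmarked number) instead of A's per-number trial division, and for each prime computes only the running Lucas-Lehmer residue in one pass instead of building the full residue list, re-scanning it with .index and indexing back into the prime list.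
import Mathlib
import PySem

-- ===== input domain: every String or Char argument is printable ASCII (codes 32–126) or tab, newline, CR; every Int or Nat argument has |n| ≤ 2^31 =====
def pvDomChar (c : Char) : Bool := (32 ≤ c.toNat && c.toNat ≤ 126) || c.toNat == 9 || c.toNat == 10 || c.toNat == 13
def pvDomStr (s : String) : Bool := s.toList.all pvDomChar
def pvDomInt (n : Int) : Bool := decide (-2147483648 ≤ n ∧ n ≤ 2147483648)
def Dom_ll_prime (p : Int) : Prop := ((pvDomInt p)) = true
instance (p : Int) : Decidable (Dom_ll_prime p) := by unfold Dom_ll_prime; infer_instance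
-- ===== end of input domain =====

-- B replaces A's per-number trial division by a sieve (a set of composites built once) and keeps
-- only the running Lucas-Lehmer residue instead of the full sequence list plus a .index scan;
-- objective: alternative (overall cost is dominated by the identical big-int squarings).

-- ===== PORT A =====
-- 2 ** p - 1; exact for 0 ≤ p (lucas_lehmer only calls it with p ≥ 3)
def mersenne_numberA (p : Int) : Int := 2 ^ p.toNat - 1

-- returns the TRUTHINESS of Python's is_prime (False or the number itself, used as 'if is_prime(n)').
-- The float test '(number / factor) > 1.0' is rendered as 'factor < number': when it is evaluated,
-- factor divides number, so number/factor is an exact float > 1.0 iff factor < number on |n| ≤ 2^31.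
def is_primeA (number : Int) : Bool :=
  if number == 1 then false
  else
    ((PySem.List.pyRange 2 number 1).foldl
      (fun acc factor => acc && !(PySem.Int.mod number factor == 0 && decide (factor < number))) true)
    && number != 0

def get_primesA (n_start n_end : Int) : List Int :=
  (PySem.List.pyRange n_start n_end 1).foldl
    (fun holder number => if is_primeA number then holder ++ [number] else holder) []

-- 'final = (initial ** 2 - 2) % mersenne_number(p)'
def llFinalA (p s : Int) : Int := PySem.Int.mod (s ^ 2 - 2) (mersenne_numberA p)

-- 'while count <= p' with count = 3,4,…  ⇒  fold over the counter values range(3, p+1)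
def lucas_lehmerA (p : Int) : List Int :=
  ((PySem.List.pyRange 3 (p+1) 1).foldl
    (fun (st : Int × List Int) _ => (llFinalA p st.1, st.2 ++ [llFinalA p st.1]))
    (4, [4])).2

-- 'i = lucas_lehmer_holder.index(val_x)' (never raises: val_x ∈ llh) is written inline at both
-- uses of get_prime_holder[i]; val_x is never empty, so the .getD defaults are never used
def ll_prime (p : Int) : List (Int × Int) :=
  let gph := get_primesA 3 p
  let llh := gph.foldl (fun acc val => acc ++ [lucas_lehmerA val]) []
  llh.foldl (fun v valx =>
    if (PySem.List.pyGet? valx (-1)).getD 0 == 0 then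
      v ++ [(PySem.List.pyGetD gph (((PySem.List.index? llh valx).getD 0 : Nat) : Int) 0, 1)]
    else if !((PySem.List.pyGet? valx (-1)).getD 0 == 0) then
      v ++ [(PySem.List.pyGetD gph (((PySem.List.index? llh valx).getD 0 : Nat) : Int) 0, 0)]
    else v) []

-- ===== PORT B =====
-- loop body of B's sieve: 'if i not in comp: (if i >= 3: primes.append(i)); comp.update(range(i*i, p, i))'
def sieveStepB (p : Int) (st : PySem.Set Int × List Int) (i : Int) : PySem.Set Int × List Int :=
  if st.1.contains i then st
  else (st.1.update (PySem.List.pyRange (i*i) p i),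
        if decide (3 ≤ i) then st.2 ++ [i] else st.2)

-- m = 2**q - 1 (q ≥ 3 for every q in primes, so q.toNat is exact) and the running residue s
-- are written inline where Source B names them
def ll_prime_alt (p : Int) : List (Int × Int) :=
  let st := (PySem.List.pyRange 2 p 1).foldl (sieveStepB p) (PySem.Set.empty, [])
  st.2.foldl (fun out q =>
    out ++ [(q, if (PySem.List.pyRange 0 (q-2) 1).foldl
                    (fun s _ => PySem.Int.mod (s*s - 2) (2 ^ q.toNat - 1)) 4 == 0
                then (1:Int) else 0)]) []

-- ===== PRECONDITION & SPEC =====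
def Spec_ll_prime (p : Int) (out : List (Int × Int)) : Prop := out = ll_prime_alt p
instance (p : Int) (out : List (Int × Int)) : Decidable (Spec_ll_prime p out) := by unfold Spec_ll_prime; infer_instance

-- ===== CLAIM (what is proved, stated in full; the proofs are below) =====
def Claim_equal_ll_prime : Prop := ∀ (p : Int), Dom_ll_prime p → Spec_ll_prime p (ll_prime p)

-- ===== LEMMAS AND PROOFS =====

-- mathematical primality over Int (2 ≤ n with no divisor in [2, n))
def IsP (n : Int) : Prop := 2 ≤ n ∧ ∀ d : Int, 2 ≤ d → d < n → ¬ d ∣ n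

theorem foldl_and_not {α : Type} (q : α → Bool) (l : List α) (acc : Bool) :
    l.foldl (fun a x => a && !(q x)) acc = (acc && l.all fun x => !(q x)) := by
  induction l generalizing acc with
  | nil => simp
  | cons x l ih => simp [List.foldl_cons, ih, Bool.and_assoc]

theorem IsP_iff_nat (n : Int) (h2 : 2 ≤ n) : IsP n ↔ Nat.Prime n.toNat := by
  rw [Nat.prime_def_lt]
  constructor
  · rintro ⟨-, hd⟩
    refine ⟨by omega, fun m hm hdvd => ?_⟩
    by_contra hm1
    have hm0 : m ≠ 0 := by rintro rfl; simp at hdvd; omega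
    have h2m : 2 ≤ m := by omega
    refine hd (m : Int) (by exact_mod_cast h2m) (by omega) ?_
    have : (m : Int) ∣ (n.toNat : Int) := Int.natCast_dvd_natCast.mpr hdvd
    simpa [Int.toNat_of_nonneg (by omega : (0:Int) ≤ n)] using this
  · rintro ⟨-, hd⟩
    refine ⟨h2, fun d hd2 hdn hdvd => ?_⟩
    have h0d : 0 ≤ d := by omega
    have : d.toNat ∣ n.toNat := by
      rw [← Int.natCast_dvd_natCast, Int.toNat_of_nonneg h0d,
        Int.toNat_of_nonneg (by omega : (0:Int) ≤ n)]
      exact hdvd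
    have := hd d.toNat (by omega) this
    omega

theorem is_primeA_iff (n : Int) (h2 : 2 ≤ n) : is_primeA n = true ↔ IsP n := by
  unfold is_primeA
  rw [if_neg (by simp; omega)]
  rw [foldl_and_not (fun factor => PySem.Int.mod n factor == 0 && decide (factor < n))]
  simp only [Bool.true_and, Bool.and_eq_true, List.all_eq_true, ne_eq, bne_iff_ne]
  constructor
  · rintro ⟨hall, -⟩
    refine ⟨h2, fun d hd2 hdn hdvd => ?_⟩
    have hmem : d ∈ PySem.List.pyRange 2 n 1 := (PySem.List.mem_pyRange_one).mpr ⟨hd2, hdn⟩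
    have := hall d hmem
    simp [PySem.Int.mod_eq_zero_iff_dvd, hdvd, hdn] at this
  · rintro ⟨-, hd⟩
    refine ⟨fun d hmem => ?_, by omega⟩
    rw [PySem.List.mem_pyRange_one] at hmem
    simp only [Bool.not_eq_eq_eq_not, Bool.not_true, Bool.and_eq_false_iff]
    left
    simp [PySem.Int.mod_eq_zero_iff_dvd]
    exact hd d hmem.1 hmem.2

-- A's prime harvest is the filter of the range
theorem get_primesA_eq (p : Int) :
    get_primesA 3 p = (PySem.List.pyRange 3 p 1).filter is_primeA := by
  unfold get_primesA
  exact PySem.List.foldl_append_if_eq_filter is_primeA _ []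

-- sieve invariant: comp holds exactly the numbers < p already marked by some prime d < k
def CompInv (p k : Int) (comp : List Int) : Prop :=
  ∀ j, j ∈ comp ↔ ∃ d, 2 ≤ d ∧ d < k ∧ IsP d ∧ d*d ≤ j ∧ j < p ∧ d ∣ j

theorem mem_comp_iff {p k : Int} {comp : List Int} (hI : CompInv p k comp)
    (h2 : 2 ≤ k) (hkp : k < p) : k ∈ comp ↔ ¬ IsP k := by
  rw [hI k]
  constructor
  · rintro ⟨d, hd2, hdk, -, -, -, hdvd⟩ ⟨-, hno⟩
    exact hno d hd2 hdk hdvd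
  · intro hnp
    have hnpn : ¬ Nat.Prime k.toNat := fun h => hnp ((IsP_iff_nat k h2).mpr h)
    have hk0 : 0 < k.toNat := by omega
    set m := k.toNat.minFac with hm
    have hmp : Nat.Prime m := Nat.minFac_prime (by omega)
    have hmdvd : m ∣ k.toNat := Nat.minFac_dvd _
    have hmsq : m ^ 2 ≤ k.toNat := Nat.minFac_sq_le_self hk0 hnpn
    have hm2 : 2 ≤ m := hmp.two_le
    refine ⟨(m : Int), by exact_mod_cast hm2, ?_, ?_, ?_, hkp, ?_⟩
    · have : m < m * m := by nlinarith
      have : m < k.toNat := by nlinarith [hmsq, sq m]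
      omega
    · rw [IsP_iff_nat _ (by exact_mod_cast hm2)]
      simpa using hmp
    · have : (m:Int) * m ≤ (k.toNat : Int) := by
        exact_mod_cast (by nlinarith [hmsq, sq m] : m * m ≤ k.toNat)
      omega
    · have : (m : Int) ∣ (k.toNat : Int) := Int.natCast_dvd_natCast.mpr hmdvd
      simpa [Int.toNat_of_nonneg (by omega : (0:Int) ≤ k)] using this

theorem compInv_step {p k : Int} {comp : List Int} (hI : CompInv p k comp)
    (h2 : 2 ≤ k) (hkp : k < p) :
    CompInv p (k+1) (if comp.contains k then comp
                     else PySem.Set.update comp (PySem.List.pyRange (k*k) p k)) := by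
  have hmemk := mem_comp_iff hI h2 hkp
  by_cases hc : k ∈ comp
  · rw [if_pos (by simpa using hc)]
    intro j
    rw [hI j]
    constructor
    · rintro ⟨d, h1, h2', h3, h4, h5, h6⟩; exact ⟨d, h1, by omega, h3, h4, h5, h6⟩
    · rintro ⟨d, h1, h2', h3, h4, h5, h6⟩
      refine ⟨d, h1, ?_, h3, h4, h5, h6⟩
      rcases lt_or_eq_of_le (by omega : d ≤ k) with h | h
      · exact h
      · exact absurd h3 (by rw [h]; exact hmemk.mp hc)
  · rw [if_neg (by simpa using hc)]
    have hIk : IsP k := by by_contra h; exact hc (hmemk.mpr h)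
    intro j
    have hmem_upd : j ∈ PySem.Set.update comp (PySem.List.pyRange (k*k) p k) ↔
        j ∈ comp ∨ j ∈ PySem.List.pyRange (k*k) p k := by
      rw [PySem.Set.update_eq_append_filter]
      simp [List.mem_append, List.mem_filter, PySem.Set.mem_ofList, PySem.Set.contains]
      constructor
      · rintro (h | ⟨h, -⟩); exact Or.inl h; exact Or.inr h
      · rintro (h | h)
        · exact Or.inl h
        · by_cases hj : j ∈ comp
          · exact Or.inl hj
          · exact Or.inr ⟨h, by simpa using hj⟩
    rw [hmem_upd, hI j, PySem.List.mem_pyRange_iff_of_pos (by omega : (0:Int) < k)]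
    constructor
    · rintro (⟨d, h1, h2', h3, h4, h5, h6⟩ | ⟨h1, h2', h3⟩)
      · exact ⟨d, h1, by omega, h3, h4, h5, h6⟩
      · have hdvd : k ∣ j := by have := dvd_add h3 (Dvd.intro k rfl); simpa using this
        exact ⟨k, h2, by omega, hIk, h1, h2', hdvd⟩
    · rintro ⟨d, h1, h2', h3, h4, h5, h6⟩
      rcases lt_or_eq_of_le (by omega : d ≤ k) with h | h
      · exact Or.inl ⟨d, h1, h, h3, h4, h5, h6⟩
      · subst h
        exact Or.inr ⟨h4, h5, dvd_sub h6 (Dvd.intro d rfl)⟩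

theorem sieve_spec (p : Int) : ∀ (n : Nat) (k : Int) (comp : PySem.Set Int) (primes : List Int),
    n = (p - k).toNat → 2 ≤ k → CompInv p k comp →
    ((PySem.List.pyRange k p 1).foldl (sieveStepB p) (comp, primes)).2
      = primes ++ (PySem.List.pyRange k p 1).filter (fun m => is_primeA m && decide (3 ≤ m)) := by
  intro n
  induction n with
  | zero =>
    intro k comp primes hn h2 hI
    rw [PySem.List.pyRange_one_eq_nil (by omega)]
    simp
  | succ n ih =>
    intro k comp primes hn h2 hI
    have hkp : k < p := by omega
    rw [PySem.List.pyRange_one_cons hkp]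
    have hmemk := mem_comp_iff hI h2 hkp
    have hstep := compInv_step hI h2 hkp
    have hcont : (PySem.Set.contains comp k) = (k ∈ comp : Bool) := by
      simp [PySem.Set.contains]
    by_cases hk : IsP k
    · have hknot : k ∉ comp := fun h => (hmemk.mp h) hk
      have hprime : is_primeA k = true := (is_primeA_iff k h2).mpr hk
      simp only [List.foldl_cons, List.filter_cons, sieveStepB, hcont]
      rw [if_neg (by simpa using hknot)] at hstep ⊢
      rw [ih (k+1) _ _ (by omega) (by omega) hstep]
      by_cases h3 : (3:Int) ≤ k
      · simp [hprime, h3]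
      · simp [hprime, h3]
    · have hkin : k ∈ comp := hmemk.mpr hk
      have hprime : is_primeA k = false := by
        by_contra h
        exact hk ((is_primeA_iff k h2).mp (by simpa using h))
      simp only [List.foldl_cons, List.filter_cons, sieveStepB, hcont]
      rw [if_pos (by simpa using hkin)] at hstep ⊢
      rw [ih (k+1) _ _ (by omega) (by omega) hstep]
      simp [hprime]

theorem primesB_eq (p : Int) :
    ((PySem.List.pyRange 2 p 1).foldl (sieveStepB p) (PySem.Set.empty, [])).2
      = (PySem.List.pyRange 3 p 1).filter is_primeA := by
  have hinv : CompInv p 2 [] := by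
    intro j; simp; intro d h1 h2; omega
  rw [sieve_spec p (p-2).toNat 2 PySem.Set.empty [] rfl (by omega) hinv]
  by_cases h2p : 2 < p
  · rw [PySem.List.pyRange_one_cons h2p]
    rw [List.filter_cons]
    norm_num
    rw [List.filter_congr]
    intro m hm
    rw [PySem.List.mem_pyRange_one] at hm
    simp [hm.1]
  · rw [PySem.List.pyRange_one_eq_nil (by omega), PySem.List.pyRange_one_eq_nil (by omega)]
    simp

-- lucas_lehmer folds: last element and length
theorem ll_fold_last (g : Int → Int) (L : List Int) : ∀ (s : Int) (acc : List Int),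
    (L.foldl (fun (st : Int × List Int) _ => (g st.1, st.2 ++ [g st.1])) (s, acc ++ [s])).2.getLast?
      = some (L.foldl (fun s _ => g s) s) := by
  induction L with
  | nil => intro s acc; simp
  | cons x L ih =>
    intro s acc
    simpa using ih (g s) (acc ++ [s])

theorem ll_fold_len (g : Int → Int) (L : List Int) : ∀ (s : Int) (acc : List Int),
    (L.foldl (fun (st : Int × List Int) _ => (g st.1, st.2 ++ [g st.1])) (s, acc)).2.length
      = acc.length + L.length := by
  induction L with
  | nil => intro s acc; simp
  | cons x L ih =>
    intro s acc
    simp only [List.foldl_cons]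
    have := ih (g s) (acc ++ [g s])
    simp at this
    simp [this]
    omega

theorem foldl_ignore_eq_iterate {α : Type} (g : α → α) (L : List Int) (s : α) :
    L.foldl (fun s _ => g s) s = g^[L.length] s := by
  induction L generalizing s with
  | nil => rfl
  | cons x L ih => simp [List.foldl_cons, ih, Function.iterate_succ_apply]

theorem length_llA (q : Int) : (lucas_lehmerA q).length = 1 + (q - 2).toNat := by
  unfold lucas_lehmerA
  rw [ll_fold_len (llFinalA q)]
  simp [PySem.List.length_pyRange_one]
  omega

-- A's last residue equals B's running residue
theorem residue_eq (q : Int) :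
    (lucas_lehmerA q).getLast?.getD 0
      = (PySem.List.pyRange 0 (q-2) 1).foldl
          (fun s _ => PySem.Int.mod (s*s - 2) (2 ^ q.toNat - 1)) 4 := by
  unfold lucas_lehmerA
  have h := ll_fold_last (llFinalA q) (PySem.List.pyRange 3 (q+1) 1) 4 []
  simp only [List.nil_append] at h
  rw [h, Option.getD_some]
  rw [foldl_ignore_eq_iterate (llFinalA q),
      foldl_ignore_eq_iterate (fun s => PySem.Int.mod (s*s - 2) (2 ^ q.toNat - 1))]
  have hg : llFinalA q = (fun s => PySem.Int.mod (s*s - 2) (2 ^ q.toNat - 1)) := by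
    funext s
    simp [llFinalA, mersenne_numberA, pow_two]
  have hlen : (PySem.List.pyRange 3 (q+1) 1).length = (PySem.List.pyRange 0 (q-2) 1).length := by
    simp [PySem.List.length_pyRange_one]
    omega
  rw [hg, hlen]

theorem index_map_getD {β : Type} [BEq β] [LawfulBEq β] (f : Int → β) :
    ∀ (l : List Int) (q : Int), q ∈ l → (∀ x ∈ l, f x = f q → x = q) →
    PySem.List.pyGetD l (((PySem.List.index? (l.map f) (f q)).getD 0 : Nat) : Int) 0 = q := by
  intro l
  induction l with
  | nil => intro q hq; simp at hq
  | cons x l ih =>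
    intro q hq hinj
    by_cases hfx : f x = f q
    · have hxq : x = q := hinj x (List.mem_cons_self) hfx
      rw [List.map_cons, ← hfx, PySem.List.index?_cons_self]
      simpa using hxq
    · have hql : q ∈ l := by
        rcases List.mem_cons.mp hq with h | h
        · exact absurd (by rw [h]) hfx
        · exact h
      rw [List.map_cons, PySem.List.index?_cons_of_ne (l.map f) hfx]
      have hsome : (PySem.List.index? (l.map f) (f q)).isSome := by
        rw [PySem.List.index?_isSome_iff]
        exact List.mem_map_of_mem hql
      obtain ⟨n, hn⟩ := Option.isSome_iff_exists.mp hsome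
      have hrec := ih q hql (fun y hy => hinj y (List.mem_cons_of_mem x hy))
      rw [hn] at hrec ⊢
      simp only [Option.map_some, Option.getD_some] at hrec ⊢
      rw [show (((n + 1 : Nat) : Nat) : Int) = ((n : Nat) : Int) + 1 by push_cast; ring]
      simpa [PySem.List.pyGetD] using hrec

theorem ll_prime_eq_map (p : Int) :
    ll_prime p = (get_primesA 3 p).map (fun q =>
      (q, if (lucas_lehmerA q).getLast?.getD 0 == 0 then (1:Int) else 0)) := by
  unfold ll_prime
  simp only [PySem.List.foldl_append_singleton_eq_map, List.nil_append]
  set gph := get_primesA 3 p with hg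
  set llh := gph.map lucas_lehmerA with hl
  have h3 : ∀ x ∈ gph, (3:Int) ≤ x := by
    intro x hx
    rw [hg, get_primesA_eq] at hx
    have := (List.mem_filter.mp hx).1
    exact ((PySem.List.mem_pyRange_one).mp this).1
  have hinj : ∀ q ∈ gph, ∀ x ∈ gph, lucas_lehmerA x = lucas_lehmerA q → x = q := by
    intro q hq x hx hxq
    have hlen := congrArg List.length hxq
    rw [length_llA, length_llA] at hlen
    have := h3 q hq
    have := h3 x hx
    omega
  have hF : ∀ (v : List (Int × Int)) (valx : List Int),
      (if (PySem.List.pyGet? valx (-1)).getD 0 == 0 then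
        v ++ [(PySem.List.pyGetD gph (((PySem.List.index? llh valx).getD 0 : Nat) : Int) 0, 1)]
      else if !((PySem.List.pyGet? valx (-1)).getD 0 == 0) then
        v ++ [(PySem.List.pyGetD gph (((PySem.List.index? llh valx).getD 0 : Nat) : Int) 0, 0)]
      else v)
      = v ++ [(PySem.List.pyGetD gph (((PySem.List.index? llh valx).getD 0 : Nat) : Int) 0,
               if (PySem.List.pyGet? valx (-1)).getD 0 == 0 then (1:Int) else 0)] := by
    intro v valx
    by_cases h : ((PySem.List.pyGet? valx (-1)).getD 0 == 0 : Bool) = true <;> simp [h]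
  simp only [hF]
  rw [PySem.List.foldl_append_singleton_eq_map, List.nil_append, hl, List.map_map]
  apply List.map_congr_left
  intro q hq
  simp only [Function.comp_apply]
  rw [← hl]
  have hfst : PySem.List.pyGetD gph
      (((PySem.List.index? llh (lucas_lehmerA q)).getD 0 : Nat) : Int) 0 = q := by
    rw [hl]
    exact index_map_getD lucas_lehmerA gph q hq (fun x hx => hinj q hq x hx)
  rw [hfst, PySem.List.pyGet?_neg_one]

theorem ll_prime_alt_eq_map (p : Int) :
    ll_prime_alt p = ((PySem.List.pyRange 3 p 1).filter is_primeA).map (fun q =>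
      (q, if (PySem.List.pyRange 0 (q-2) 1).foldl
            (fun s _ => PySem.Int.mod (s*s - 2) (2 ^ q.toNat - 1)) 4 == 0
          then (1:Int) else 0)) := by
  show (((PySem.List.pyRange 2 p 1).foldl (sieveStepB p) (PySem.Set.empty, [])).2.foldl
    (fun out q => out ++ [(q, if (PySem.List.pyRange 0 (q-2) 1).foldl
        (fun s _ => PySem.Int.mod (s*s - 2) (2 ^ q.toNat - 1)) 4 == 0 then (1:Int) else 0)]) []) = _
  rw [primesB_eq, PySem.List.foldl_append_singleton_eq_map]
  simp

-- ===== VERDICT (by name: the statement is the Claim_ definition above) =====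
theorem ll_prime_spec : Claim_equal_ll_prime := by
  intro p _
  unfold Spec_ll_prime
  rw [ll_prime_eq_map, ll_prime_alt_eq_map, get_primesA_eq]
  refine List.map_congr_left ?_
  intro q hq
  rw [residue_eq]
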